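-- pv_equiv track=rewrite | github.com/JGRoldan/Programacion-UNGS | Introducción a la programación/Práctica 5/P5-EJ-11-a-16.py | maximoEntre
-- ===== SOURCE A (Python) =====
-- def maximoEntre(lista,x,y):
--     maxElem=lista[0]
--     for i in lista:
--         if i>maxElem and x<i<y:
--             maxElem=i
--
--     index=0
--     for i in range(len(lista)):
--         if maxElem==lista[i]:
--             index=i
--     return index
-- ===== SOURCE B (Python) =====
-- def maximoEntre(lista, x, y):
--     maxElem = lista[0]
--     index = 0
--     for i, v in enumerate(lista):
--         if v > maxElem and x < v < y:
--             maxElem = v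
--             index = i
--         elif v == maxElem:
--             index = i
--     return index
-- ===== Notes on version B (the rewrite author's own statement) =====
-- stated objective: alternative
-- what changed: Fuses A's two staged passes (a running-max loop, then a full rescan for the last index of that max) into one single pass over enumerate(lista) that maintains the pair (running max, last index of the current max) simultaneously; correct because no element equal to a future max can precede the update that installs that max.
import Mathlib
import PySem

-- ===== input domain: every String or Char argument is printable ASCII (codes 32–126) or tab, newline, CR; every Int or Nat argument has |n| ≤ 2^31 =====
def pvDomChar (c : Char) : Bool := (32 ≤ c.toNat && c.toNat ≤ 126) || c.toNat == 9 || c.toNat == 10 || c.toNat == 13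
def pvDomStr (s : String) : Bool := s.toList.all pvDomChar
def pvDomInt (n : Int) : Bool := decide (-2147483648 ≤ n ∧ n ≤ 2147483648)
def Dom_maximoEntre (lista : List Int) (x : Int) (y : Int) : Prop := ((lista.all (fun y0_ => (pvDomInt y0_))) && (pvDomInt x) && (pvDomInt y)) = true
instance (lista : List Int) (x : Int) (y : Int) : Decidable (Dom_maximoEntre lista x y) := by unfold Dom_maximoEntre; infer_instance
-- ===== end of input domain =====

-- B fuses A's two staged passes into ONE pass over enumerate(lista), maintaining
-- (running max, last index of the current max) together (objective: alternative).

-- ===== PORT A =====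
-- first loop: running max over in-range elements, seeded with lista[0]
def maximoEntre (lista : List Int) (x : Int) (y : Int) : Int :=
  let maxElem0 := (PySem.List.pyGet? lista 0).getD 0   -- lista[0]; Pre_ excludes the empty list (IndexError)
  let maxElem := lista.foldl (fun m i => if m < i ∧ x < i ∧ i < y then i else m) maxElem0
  -- second loop: for i in range(len(lista)): if maxElem == lista[i]: index = i
  (List.range lista.length).foldl
    (fun index i => if maxElem = lista.getD i 0 then (i : Int) else index) 0

-- ===== PORT B =====
-- single pass over enumerate(lista) with the paired accumulator (maxElem, index)
def maximoEntre_alt (lista : List Int) (x : Int) (y : Int) : Int :=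
  let maxElem0 := (PySem.List.pyGet? lista 0).getD 0   -- lista[0]; Pre_ excludes the empty list (IndexError)
  let st := (PySem.List.enumerate lista).foldl
    (fun (s : Int × Int) (p : Int × Int) =>
      if s.1 < p.2 ∧ x < p.2 ∧ p.2 < y then (p.2, p.1)
      else if p.2 = s.1 then (s.1, p.1) else s)
    (maxElem0, 0)
  st.2

-- ===== PRECONDITION & SPEC =====
-- A (and B) evaluate lista[0], an IndexError on the empty list: Pre_ excludes exactly that.
def Pre_maximoEntre (lista : List Int) (x : Int) (y : Int) : Prop := lista ≠ []
instance (lista : List Int) (x : Int) (y : Int) : Decidable (Pre_maximoEntre lista x y) := by unfold Pre_maximoEntre; infer_instance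
def pvWitness_maximoEntre : List Int × Int × Int := ([3, 1, 2], 0, 5)

def Spec_maximoEntre (lista : List Int) (x : Int) (y : Int) (out : Int) : Prop := out = maximoEntre_alt lista x y
instance (lista : List Int) (x : Int) (y : Int) (out : Int) : Decidable (Spec_maximoEntre lista x y out) := by unfold Spec_maximoEntre; infer_instance

-- ===== CLAIM (what is proved, stated in full; the proofs are below) =====
def Claim_equal_maximoEntre : Prop := ∀ (lista : List Int) (x : Int) (y : Int), Dom_maximoEntre lista x y → Pre_maximoEntre lista x y → Spec_maximoEntre lista x y (maximoEntre lista x y)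

-- ===== LEMMAS AND PROOFS =====

-- last-index-of accumulator: lidx t k v d = last index (offset k) of v in t, d if absent
def lidx : List Int → Int → Int → Int → Int
  | [], _, _, d => d
  | a :: t, k, v, d => lidx t (k + 1) v (if v = a then k else d)

-- A's second loop (fold over range, getD-indexing) equals lidx
theorem range_fold_eq_lidx (v : Int) : ∀ (t L : List Int) (k : Nat) (d : Int),
    t = L.drop k →
    (List.range' k t.length).foldl (fun index i => if v = L.getD i 0 then (i : Int) else index) d
      = lidx t (k : Int) v d := by
  intro t
  induction t with
  | nil => intro L k d _; rfl
  | cons a t ih =>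
    intro L k d h
    have hk : L.getD k 0 = a := by
      have h1 : (L.drop k)[0]? = some a := by rw [← h]; rfl
      have h0 : L[k]? = some a := by simpa [List.getElem?_drop] using h1
      simp [List.getD, h0]
    have ht : t = L.drop (k + 1) := by
      calc t = List.drop 1 (a :: t) := rfl
        _ = List.drop 1 (List.drop k L) := by rw [← h]
        _ = L.drop (k + 1) := by simp [List.drop_drop]
    simp only [List.length_cons, List.range'_succ, List.foldl_cons, hk, lidx]
    rw [ih L (k + 1) _ ht]
    push_cast
    ring_nf

theorem lidx_concat (v : Int) : ∀ (l : List Int) (a : Int) (k d : Int),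
    lidx (l ++ [a]) k v d = if v = a then k + (l.length : Int) else lidx l k v d := by
  intro l
  induction l with
  | nil => intro a k d; simp [lidx]
  | cons b l ih =>
    intro a k d
    by_cases hv : v = a
    · simp only [List.cons_append, lidx, ih, if_pos hv, List.length_cons]
      push_cast
      ring
    · simp only [List.cons_append, lidx, ih, if_neg hv]

-- the fused single-pass invariant: after the prefix h :: l, B's state is exactly
-- (A's running max over that prefix, last index of that max in the prefix)
theorem fused_inv (x y : Int) (h : Int) : ∀ (l : List Int),
    (PySem.List.enumerate (h :: l)).foldl
      (fun (s : Int × Int) (p : Int × Int) =>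
        if s.1 < p.2 ∧ x < p.2 ∧ p.2 < y then (p.2, p.1)
        else if p.2 = s.1 then (s.1, p.1) else s)
      (h, 0)
    = ((h :: l).foldl (fun m i => if m < i ∧ x < i ∧ i < y then i else m) h,
       lidx (h :: l) 0 ((h :: l).foldl (fun m i => if m < i ∧ x < i ∧ i < y then i else m) h) 0) := by
  intro l
  induction l using List.reverseRecOn with
  | nil =>
    simp [PySem.List.enumerate, lidx]
  | append_singleton l a ih =>
    have hLL : h :: (l ++ [a]) = (h :: l) ++ [a] := by simp
    rw [hLL, PySem.List.enumerate_append, List.foldl_append, List.foldl_append, ih]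
    set M := (h :: l).foldl (fun m i => if m < i ∧ x < i ∧ i < y then i else m) h with hM
    simp only [PySem.List.enumerate, List.foldl_cons, List.foldl_nil]
    by_cases hc : M < a ∧ x < a ∧ a < y
    · rw [if_pos hc, if_pos hc, lidx_concat, if_pos rfl]
    · rw [if_neg hc, if_neg hc, lidx_concat]
      by_cases he : a = M
      · rw [if_pos he, if_pos (by rw [he]), Prod.mk.injEq]
        exact ⟨rfl, by simp⟩
      · rw [if_neg he, if_neg (fun hMa => he hMa.symm)]

-- ===== VERDICT (by name: the statement is the Claim_ definition above) =====
theorem maximoEntre_spec : Claim_equal_maximoEntre := by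
  intro lista x y _ hpre
  obtain ⟨h, rest, rfl⟩ := List.exists_cons_of_ne_nil hpre
  show maximoEntre (h :: rest) x y = maximoEntre_alt (h :: rest) x y
  simp only [maximoEntre, maximoEntre_alt]
  have hget : (PySem.List.pyGet? (h :: rest) 0).getD 0 = h := by
    simp [PySem.List.pyGet?, PySem.List.pyIdx?]
  rw [hget, fused_inv]
  have hfold := range_fold_eq_lidx
    ((h :: rest).foldl (fun m i => if m < i ∧ x < i ∧ i < y then i else m) h)
    (h :: rest) (h :: rest) 0 0 (by simp)
  simp only [Nat.cast_zero] at hfold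
  rw [← List.range_eq_range'] at hfold
  rw [hfold]
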